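-- pv_equiv track=rewrite | github.com/steinarvk/whistle | whistle.py | break_timeseq
-- ===== SOURCE A (Python) =====
-- import collections
--
-- def break_timeseq(timeseq, breaks):
--     breaks = collections.deque(breaks)
--     rv = []
--     for t, v in timeseq:
--         while breaks and t > breaks[0]:
--             if rv:
--                 yield rv
--                 rv = []
--             breaks.popleft()
--         rv.append((t,v))
--     if rv:
--         yield rv
-- ===== SOURCE B (Python) =====
-- def break_timeseq(timeseq, breaks):
--     # Phase 1: tag each item with a forward-only pointer into the breaks list.
--     bs = list(breaks)
--     p = 0
--     keyed = []
--     for t, v in timeseq: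
--         while p < len(bs) and t > bs[p]:
--             p += 1
--         keyed.append((p, (t, v)))
--     # Phase 2: group consecutive items with the same pointer value.
--     i, n = 0, len(keyed)
--     while i < n:
--         j = i
--         while j < n and keyed[j][0] == keyed[i][0]:
--             j += 1
--         yield [item for _, item in keyed[i:j]]
--         i = j
-- ===== Notes on version B (the rewrite author's own statement) =====
-- stated objective: alternative
-- what changed: Replaces A's single interleaved loop (deque popping with yields fired inside the inner while) by a two-phase decomposition: one pass tags each item with a monotone forward pointer into the breaks list, then a second pass groups consecutive items with equal tags.
import Mathlib
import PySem

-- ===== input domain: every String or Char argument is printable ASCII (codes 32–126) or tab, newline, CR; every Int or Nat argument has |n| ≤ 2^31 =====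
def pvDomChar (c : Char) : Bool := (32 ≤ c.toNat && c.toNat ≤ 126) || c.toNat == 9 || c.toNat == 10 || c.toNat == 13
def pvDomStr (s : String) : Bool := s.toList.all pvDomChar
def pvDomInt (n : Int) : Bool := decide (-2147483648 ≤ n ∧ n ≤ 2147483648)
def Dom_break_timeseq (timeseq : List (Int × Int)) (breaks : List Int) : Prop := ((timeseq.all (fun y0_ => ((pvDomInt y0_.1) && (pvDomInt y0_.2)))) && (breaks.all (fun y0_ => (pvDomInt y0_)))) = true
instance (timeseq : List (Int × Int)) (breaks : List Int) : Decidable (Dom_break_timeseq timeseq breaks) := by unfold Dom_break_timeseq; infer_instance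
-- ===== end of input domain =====

-- B replaces A's interleaved deque-popping/yielding loop by a two-phase pass (tag each
-- item with a monotone pointer into breaks, then group consecutive equal tags); same
-- cost, different decomposition (objective: alternative). Both are generators in Python;
-- the equivalence is about the sequence of yielded segments, collected as a list.

-- ===== PORT A =====
-- the inner 'while breaks and t > breaks[0]' loop: returns (remaining breaks, rv, out)
def pyWhileA (t : Int) : List Int → List (Int × Int) → List (List (Int × Int)) →
    (List Int × List (Int × Int) × List (List (Int × Int)))
  | [], rv, out => ([], rv, out)
  | b :: bs, rv, out =>
    if t > b then
      if rv ≠ [] then pyWhileA t bs [] (out ++ [rv])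
      else pyWhileA t bs rv out
    else (b :: bs, rv, out)

-- the outer 'for t, v in timeseq' loop, then the final 'if rv: yield rv'
def pyLoopA : List (Int × Int) → List Int → List (Int × Int) → List (List (Int × Int)) →
    List (List (Int × Int))
  | [], _, rv, out => if rv ≠ [] then out ++ [rv] else out
  | (t, v) :: rest, bs, rv, out =>
    match pyWhileA t bs rv out with
    | (bs', rv', out') => pyLoopA rest bs' (rv' ++ [(t, v)]) out'

def break_timeseq (timeseq : List (Int × Int)) (breaks : List Int) : List (List (Int × Int)) :=
  pyLoopA timeseq breaks [] []

-- ===== PORT B =====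
-- 'while p < len(bs) and t > bs[p]: p += 1' — the pointer, realised as (suffix, index)
def altAdvance (t : Int) : List Int → Nat → (List Int × Nat)
  | b :: bs, p => if t > b then altAdvance t bs (p + 1) else (b :: bs, p)
  | [], p => ([], p)

-- phase 1: tag every item with the current pointer value
def altKey : List (Int × Int) → List Int → Nat → List (Nat × (Int × Int))
  | [], _, _ => []
  | (t, v) :: rest, bs, p =>
    match altAdvance t bs p with
    | (bs', p') => (p', (t, v)) :: altKey rest bs' p'

-- phase 2: group consecutive items carrying the same tag
def altGroup : List (Nat × (Int × Int)) → List (List (Int × Int))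
  | [] => []
  | (p, x) :: rest =>
    (x :: (rest.takeWhile (fun y => y.1 == p)).map (·.2)) ::
      altGroup (rest.dropWhile (fun y => y.1 == p))
  termination_by l => l.length
  decreasing_by
    have := List.length_dropWhile_le (fun y => y.1 == p) rest
    simp
    omega

def break_timeseq_alt (timeseq : List (Int × Int)) (breaks : List Int) : List (List (Int × Int)) :=
  altGroup (altKey timeseq breaks 0)

-- ===== PRECONDITION & SPEC =====
def Spec_break_timeseq (timeseq : List (Int × Int)) (breaks : List Int) (out : List (List (Int × Int))) : Prop := out = break_timeseq_alt timeseq breaks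
instance (timeseq : List (Int × Int)) (breaks : List Int) (out : List (List (Int × Int))) : Decidable (Spec_break_timeseq timeseq breaks out) := by unfold Spec_break_timeseq; infer_instance

-- ===== CLAIM (what is proved, stated in full; the proofs are below) =====
def Claim_equal_break_timeseq : Prop := ∀ (timeseq : List (Int × Int)) (breaks : List Int), Dom_break_timeseq timeseq breaks → Spec_break_timeseq timeseq breaks (break_timeseq timeseq breaks)


-- ===== LEMMAS AND PROOFS =====

theorem altGroup_nil : altGroup [] = [] := by rw [altGroup.eq_def]

theorem altGroup_cons (p : Nat) (x : Int × Int) (rest : List (Nat × (Int × Int))) :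
    altGroup ((p, x) :: rest) =
      (x :: (rest.takeWhile (fun y => y.1 == p)).map (·.2)) ::
        altGroup (rest.dropWhile (fun y => y.1 == p)) := by
  rw [altGroup.eq_def]

-- A's inner while-loop, characterised through B's pointer advance
theorem pyWhileA_eq (t : Int) : ∀ (bs : List Int) (p : Nat) (rv : List (Int × Int))
    (out : List (List (Int × Int))),
    pyWhileA t bs rv out =
      ((altAdvance t bs p).1,
       (if (altAdvance t bs p).2 = p then rv else []),
       out ++ (if (altAdvance t bs p).2 = p ∨ rv = [] then [] else [rv])) := by
  intro bs
  induction bs with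
  | nil => intro p rv out; simp [pyWhileA, altAdvance]
  | cons b bs ih =>
    intro p rv out
    by_cases ht : t > b
    · have hge : p + 1 ≤ (altAdvance t bs (p + 1)).2 := by
        clear ih
        induction bs generalizing p with
        | nil => simp [altAdvance]
        | cons c cs ih2 =>
          by_cases h : t > c
          · simp only [altAdvance, if_pos h]
            have := ih2 (p + 1); omega
          · simp [altAdvance, h]
      have hne' : (altAdvance t bs (p + 1)).2 ≠ p := by omega
      by_cases hrv : rv = []
      · subst hrv
        simp only [pyWhileA, if_pos ht, ne_eq, not_true_eq_false, reduceIte]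
        rw [ih (p + 1)]
        simp [altAdvance, ht, hne']
      · simp only [pyWhileA, if_pos ht, ne_eq, hrv, not_false_eq_true, if_pos]
        rw [ih (p + 1) [] (out ++ [rv])]
        simp [altAdvance, ht, hne']
    · simp [pyWhileA, altAdvance, ht]

-- grouping a constant-tag block alone
theorem altGroup_const (p : Nat) : ∀ (xs : List (Int × Int)), xs ≠ [] →
    altGroup (xs.map (fun x => (p, x))) = [xs] := by
  intro xs hxs
  match xs with
  | [] => exact absurd rfl hxs
  | a :: xs' =>
    rw [List.map_cons, altGroup_cons]
    have h1 : (xs'.map (fun x => (p, x))).takeWhile (fun z => z.1 == p)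
        = xs'.map (fun x => (p, x)) := by
      induction xs' with
      | nil => simp
      | cons c cs ihc => simpa [List.takeWhile] using ihc
    have h2 : (xs'.map (fun x => (p, x))).dropWhile (fun z => z.1 == p) = [] := by
      clear h1
      induction xs' with
      | nil => simp
      | cons c cs ihc => simpa [List.dropWhile] using ihc
    simp [h1, h2, altGroup_nil]

-- grouping a constant-tag block followed by a differently-tagged item
theorem altGroup_const_append (p q : Nat) (hq : q ≠ p) :
    ∀ (xs : List (Int × Int)) (y : Int × Int) (K : List (Nat × (Int × Int))), xs ≠ [] →
    altGroup (xs.map (fun x => (p, x)) ++ (q, y) :: K) = xs :: altGroup ((q, y) :: K) := by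
  intro xs y K hxs
  match xs with
  | [] => exact absurd rfl hxs
  | a :: xs' =>
    rw [List.map_cons, List.cons_append, altGroup_cons]
    have h1 : (xs'.map (fun x => (p, x)) ++ (q, y) :: K).takeWhile (fun z => z.1 == p)
        = xs'.map (fun x => (p, x)) := by
      induction xs' with
      | nil => simp [hq]
      | cons c cs ihc => simpa [List.takeWhile] using ihc
    have h2 : (xs'.map (fun x => (p, x)) ++ (q, y) :: K).dropWhile (fun z => z.1 == p)
        = (q, y) :: K := by
      clear h1
      induction xs' with
      | nil => simp [hq]
      | cons c cs ihc => simpa [List.dropWhile] using ihc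
    simp [h1, h2]

-- main invariant: A's loop state = out ++ grouping of (pending rv tagged p, then the rest)
theorem loop_invariant : ∀ (rest : List (Int × Int)) (bs : List Int) (p : Nat)
    (rv : List (Int × Int)) (out : List (List (Int × Int))),
    pyLoopA rest bs rv out =
      out ++ altGroup (rv.map (fun x => (p, x)) ++ altKey rest bs p) := by
  intro rest
  induction rest with
  | nil =>
    intro bs p rv out
    by_cases hrv : rv = []
    · simp [pyLoopA, hrv, altKey, altGroup_nil]
    · simp [pyLoopA, hrv, altKey, altGroup_const p rv hrv]
  | cons tv rest ih =>
    obtain ⟨t, v⟩ := tv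
    intro bs p rv out
    simp only [pyLoopA, pyWhileA_eq t bs p rv out, altKey]
    by_cases hp : (altAdvance t bs p).2 = p
    · rw [ih _ p]
      have hm : (rv ++ [(t, v)]).map (fun x => (p, x))
          = rv.map (fun x => (p, x)) ++ [(p, (t, v))] := by simp
      simp [hp, hm]
    · by_cases hrv : rv = []
      · subst hrv
        rw [ih _ (altAdvance t bs p).2]
        simp [hp]
      · rw [ih _ (altAdvance t bs p).2]
        simp only [if_neg hp, List.nil_append, List.map_cons, List.map_nil,
          List.singleton_append]
        rw [altGroup_const_append p (altAdvance t bs p).2 hp rv (t, v) _ hrv]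
        simp [hp, hrv]

-- ===== VERDICT (by name: the statement is the Claim_ definition above) =====
theorem break_timeseq_spec : Claim_equal_break_timeseq := by
  intro timeseq breaks _
  unfold Spec_break_timeseq break_timeseq break_timeseq_alt
  simpa using loop_invariant timeseq breaks 0 [] []
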